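-- pv_equiv track=rewrite | github.com/tspader/sp | analyze_sp_alloc.py | find_transitive_callers
-- ===== SOURCE A (Python) =====
-- from typing import Dict, Set, List
--
-- def find_transitive_callers(reverse_graph: Dict[str, Set[str]], target: str) -> Dict[str, int]:
--     """
--     Find all functions that call target directly or transitively.
--     Returns dict mapping function -> depth (1 = direct caller, 2 = calls a direct caller, etc.)
--     """
--     callers = {}
--     queue = [(target, 0)]
--     visited = {target}
--
--     while queue:
--         current, depth = queue.pop(0)
--
--         for caller in reverse_graph.get(current, []):
--             if caller not in visited:
--                 visited.add(caller)
--                 callers[caller] = depth + 1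
--                 queue.append((caller, depth + 1))
--
--     return callers
-- ===== SOURCE B (Python) =====
-- from typing import Dict, Set, List
--
-- def find_transitive_callers(reverse_graph: Dict[str, Set[str]], target: str) -> Dict[str, int]:
--     """
--     Find all functions that call target directly or transitively.
--     Recursive, level-staged: for each level, first flatten the callers of the
--     whole frontier into one candidate list, then dedup it against the frozen
--     visited set (and itself, in order), record the level's depth for all of the
--     survivors at once, and recurse on them with visited extended by set union.
--     """
--     def go(frontier, visited, depth, callers):
--         candidates = [c for node in frontier for c in reverse_graph.get(node, [])]
--         discovered = []
--         for c in candidates: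
--             if c not in visited and c not in discovered:
--                 discovered.append(c)
--         for c in discovered:
--             callers[c] = depth
--         if discovered:
--             return go(discovered, visited | set(discovered), depth + 1, callers)
--         return callers
--
--     return go([target], {target}, 1, {})
-- ===== Notes on version B (the rewrite author's own statement) =====
-- stated objective: alternative
-- what changed: Replaced the FIFO queue of (node, depth) tuples mutated with pop(0)/append and an incrementally-mutated visited set by a recursive, staged per-level search: each call flattens all callers of the current frontier into one candidate list, dedups it in a separate pass against the frozen visited set and an ordered discovered list, batch-records the level depth, and recurses with visited extended by set union.
import Mathlib
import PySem

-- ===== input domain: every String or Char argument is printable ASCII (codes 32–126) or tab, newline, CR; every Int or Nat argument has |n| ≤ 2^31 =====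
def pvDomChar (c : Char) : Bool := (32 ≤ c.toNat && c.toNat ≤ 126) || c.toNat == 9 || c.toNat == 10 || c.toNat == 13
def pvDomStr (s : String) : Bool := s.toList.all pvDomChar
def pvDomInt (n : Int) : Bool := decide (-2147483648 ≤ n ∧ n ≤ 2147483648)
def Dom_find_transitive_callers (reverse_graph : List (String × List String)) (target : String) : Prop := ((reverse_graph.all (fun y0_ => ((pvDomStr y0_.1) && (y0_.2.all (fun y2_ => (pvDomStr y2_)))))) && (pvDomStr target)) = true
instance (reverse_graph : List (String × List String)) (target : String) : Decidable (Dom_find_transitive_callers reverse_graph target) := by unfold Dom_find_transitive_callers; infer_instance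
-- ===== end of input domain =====

-- B replaces A's FIFO queue of (node, depth) tuples (mutated by pop(0)/append, with an
-- incrementally-updated visited set) by a recursive, staged per-level search: flatten all
-- callers of the frontier, dedup in a second pass against the frozen visited set, record the
-- level depth in a batch, recurse (objective: alternative).

-- ===== PORT A =====
-- number of graph-mentioned nodes not yet visited: the termination measure's core
def pvUnvis (rg : List (String × List String)) (v : PySem.Set String) : Nat :=
  ((rg.flatMap Prod.snd).dedup.filter (fun x => !(PySem.Set.contains v x))).length

-- body of A's inner 'for caller in reverse_graph.get(current, [])' loop; state = (callers, queue, visited)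
def pvFA (depth : Int)
    (st : PySem.Dict String Int × List (String × Int) × PySem.Set String) (caller : String) :
    PySem.Dict String Int × List (String × Int) × PySem.Set String :=
  if PySem.Set.contains st.2.2 caller then st
  else (st.1.insert caller (depth + 1), st.2.1 ++ [(caller, depth + 1)], PySem.Set.add st.2.2 caller)

-- elements handed out by reverse_graph.get are values of the dict
theorem pvMemGetD (rg : List (String × List String)) (cur : String) :
    ∀ x ∈ PySem.Dict.getD (PySem.Dict.mk rg) cur [], x ∈ rg.flatMap Prod.snd := by
  induction rg with
  | nil => intro x hx; simp [PySem.Dict.getD, PySem.Dict.get?] at hx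
  | cons p rest ih =>
    intro x hx
    rw [PySem.Dict.getD_eq_get?_getD] at hx
    rw [PySem.Dict.get?_mk_cons] at hx
    rw [List.flatMap_cons]
    by_cases h : p.1 == cur
    · simp [h] at hx
      exact List.mem_append.2 (Or.inl hx)
    · simp [h, ← PySem.Dict.getD_eq_get?_getD] at hx
      exact List.mem_append.2 (Or.inr (ih x hx))

theorem pvContains_decide (s : PySem.Set String) (y : String) :
    PySem.Set.contains s y = decide (y ∈ s) := by
  by_cases hy : y ∈ s <;> simp [hy]

theorem pvUnvis_add_aux (v : PySem.Set String) (x : String) (hxv : x ∉ v) :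
    ∀ U : List String, U.Nodup → x ∈ U →
      (U.filter (fun y => !(PySem.Set.contains (PySem.Set.add v x) y))).length + 1 =
        (U.filter (fun y => !(PySem.Set.contains v y))).length := by
  intro U
  induction U with
  | nil => intro _ hx; simp at hx
  | cons u U ih =>
    intro hnd hx
    have hnd' := hnd.of_cons
    have hu : u ∉ U := (List.nodup_cons.mp hnd).1
    simp only [List.filter_cons]
    by_cases hux : u = x
    · subst hux
      have h1 : PySem.Set.contains (PySem.Set.add v u) u = true := by
        simp [PySem.Set.mem_add]
      have h2 : PySem.Set.contains v u = false := by
        simp [hxv]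
      rw [h1, h2]
      have hfeq : U.filter (fun y => !(PySem.Set.contains (PySem.Set.add v u) y)) =
          U.filter (fun y => !(PySem.Set.contains v y)) := by
        apply List.filter_congr
        intro y hy
        have hyx : y ≠ u := fun h => hu (h ▸ hy)
        simp [PySem.Set.mem_add, hyx]
      rw [if_neg (by simp), if_pos (by simp), hfeq, List.length_cons]
    · have hxU : x ∈ U := by
        rcases List.mem_cons.mp hx with h | h
        · exact absurd h.symm hux
        · exact h
      have hpred : PySem.Set.contains (PySem.Set.add v x) u = PySem.Set.contains v u := by
        simp [PySem.Set.mem_add, hux]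
      rw [hpred]
      by_cases hcv : PySem.Set.contains v u = true
      · rw [hcv, if_neg (by simp), if_neg (by simp)]
        exact ih hnd' hxU
      · have hcv' : PySem.Set.contains v u = false := by
          cases hh : PySem.Set.contains v u
          · rfl
          · exact absurd hh hcv
        rw [hcv', if_pos (by simp), if_pos (by simp), List.length_cons, List.length_cons]
        have := ih hnd' hxU
        omega

theorem pvUnvis_add (rg : List (String × List String)) (v : PySem.Set String) (x : String)
    (hx : x ∈ rg.flatMap Prod.snd) (hv : ¬ (PySem.Set.contains v x)) :
    pvUnvis rg (PySem.Set.add v x) + 1 = pvUnvis rg v := by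
  have hxv : x ∉ v := by
    intro h
    exact hv (by rw [pvContains_decide]; simp [h])
  exact pvUnvis_add_aux v x hxv _ (List.nodup_dedup _) (List.mem_dedup.mpr hx)

-- one inner loop of A only shrinks the measure (callers/queue/visited = st.1/st.2.1/st.2.2)
theorem pvFA_meas (rg : List (String × List String)) (depth : Int) :
    ∀ (adj : List String) (st : PySem.Dict String Int × List (String × Int) × PySem.Set String),
      (∀ x ∈ adj, x ∈ rg.flatMap Prod.snd) →
      2 * pvUnvis rg (adj.foldl (pvFA depth) st).2.2 + (adj.foldl (pvFA depth) st).2.1.length ≤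
        2 * pvUnvis rg st.2.2 + st.2.1.length := by
  intro adj
  induction adj with
  | nil => intro st _; simp
  | cons x adj ih =>
    intro st hsub
    have hx := hsub x (List.mem_cons_self)
    have htail : ∀ y ∈ adj, y ∈ rg.flatMap Prod.snd := fun y hy => hsub y (List.mem_cons_of_mem _ hy)
    simp only [List.foldl_cons]
    refine le_trans (ih _ htail) ?_
    unfold pvFA
    by_cases h : x ∈ st.2.2
    · simp [h]
    · rw [if_neg (by simpa [PySem.Set.contains_iff] using h)]
      have := pvUnvis_add rg st.2.2 x hx (by simpa [PySem.Set.contains_iff] using h)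
      simp only [List.length_append, List.length_cons, List.length_nil]
      omega

-- A's while loop, one pop per call
def pvLoopA (rg : List (String × List String)) (callers : PySem.Dict String Int)
    (queue : List (String × Int)) (visited : PySem.Set String) : PySem.Dict String Int :=
  match queue with
  | [] => callers
  | (current, depth) :: rest =>
    let st := (PySem.Dict.getD (PySem.Dict.mk rg) current []).foldl (pvFA depth) (callers, rest, visited)
    pvLoopA rg st.1 st.2.1 st.2.2
termination_by 2 * pvUnvis rg visited + queue.length
decreasing_by
  have h := pvFA_meas rg depth (PySem.Dict.getD (PySem.Dict.mk rg) current [])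
      (callers, rest, visited) (pvMemGetD rg current)
  simp only [List.length_cons] at h ⊢
  omega

def find_transitive_callers (reverse_graph : List (String × List String)) (target : String) : List (String × Int) :=
  (pvLoopA reverse_graph PySem.Dict.empty [(target, 0)] (PySem.Set.ofList [target])).items

-- ===== PORT B =====
-- B's dedup pass: 'for c in candidates: if c not in visited and c not in discovered: discovered.append(c)'
def pvDedup (v : PySem.Set String) (acc : List String) : List String → List String
  | [] => acc
  | c :: rest =>
    if PySem.Set.contains v c || acc.contains c then pvDedup v acc rest
    else pvDedup v (acc ++ [c]) rest

-- facts about pvDedup and pvUnvis that pvGo's decreasing_by cites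
theorem pvDedup_mem (v : PySem.Set String) :
    ∀ (cands acc : List String), ∀ x ∈ pvDedup v acc cands, x ∈ acc ∨ x ∈ cands := by
  intro cands
  induction cands with
  | nil => intro acc x hx; exact Or.inl hx
  | cons c rest ih =>
    intro acc x hx
    unfold pvDedup at hx
    by_cases h : PySem.Set.contains v c || acc.contains c
    · rw [if_pos h] at hx
      rcases ih acc x hx with h1 | h1
      · exact Or.inl h1
      · exact Or.inr (List.mem_cons_of_mem _ h1)
    · rw [if_neg h] at hx
      rcases ih (acc ++ [c]) x hx with h1 | h1
      · rcases List.mem_append.1 h1 with h2 | h2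
        · exact Or.inl h2
        · simp at h2; exact Or.inr (h2 ▸ List.mem_cons_self)
      · exact Or.inr (List.mem_cons_of_mem _ h1)

theorem pvDedup_unvis (v : PySem.Set String) :
    ∀ (cands acc : List String), (∀ x ∈ acc, PySem.Set.contains v x = false) →
      ∀ x ∈ pvDedup v acc cands, PySem.Set.contains v x = false := by
  intro cands
  induction cands with
  | nil => intro acc hacc x hx; exact hacc x hx
  | cons c rest ih =>
    intro acc hacc x hx
    unfold pvDedup at hx
    by_cases h : PySem.Set.contains v c || acc.contains c
    · rw [if_pos h] at hx
      exact ih acc hacc x hx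
    · rw [if_neg h] at hx
      refine ih (acc ++ [c]) ?_ x hx
      intro y hy
      rcases List.mem_append.1 hy with h1 | h1
      · exact hacc y h1
      · simp at h1
        subst h1
        simp only [Bool.or_eq_true, not_or] at h
        cases hc : PySem.Set.contains v y
        · rfl
        · exact absurd hc h.1

theorem pvUnvis_add_le (rg : List (String × List String)) (v : PySem.Set String) (x : String) :
    pvUnvis rg (PySem.Set.add v x) ≤ pvUnvis rg v := by
  unfold pvUnvis
  have hsub : ((rg.flatMap Prod.snd).dedup.filter (fun y => !(PySem.Set.contains (PySem.Set.add v x) y))).Sublist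
      ((rg.flatMap Prod.snd).dedup.filter (fun y => !(PySem.Set.contains v y))) := by
    apply List.monotone_filter_right
    intro y hy
    simp only [Bool.not_eq_true'] at hy ⊢
    cases hc : PySem.Set.contains v y
    · rfl
    · exfalso
      have hmem : y ∈ PySem.Set.add v x := (PySem.Set.mem_add v x y).2 (Or.inl (by simpa using hc))
      have hct : PySem.Set.contains (PySem.Set.add v x) y = true := by simpa using hmem
      rw [hct] at hy
      simp at hy
  exact hsub.length_le

theorem pvUnvis_foldl_le (rg : List (String × List String)) :
    ∀ (L : List String) (v : PySem.Set String),
      pvUnvis rg (L.foldl PySem.Set.add v) ≤ pvUnvis rg v := by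
  intro L
  induction L with
  | nil => intro v; simp
  | cons x r ih =>
    intro v
    simp only [List.foldl_cons]
    exact le_trans (ih _) (pvUnvis_add_le rg v x)

theorem pvUnvis_foldl_lt (rg : List (String × List String)) (L : List String)
    (v : PySem.Set String) (hne : L ≠ [])
    (hsub : ∀ x ∈ L, x ∈ rg.flatMap Prod.snd)
    (hunv : ∀ x ∈ L, PySem.Set.contains v x = false) :
    pvUnvis rg (L.foldl PySem.Set.add v) < pvUnvis rg v := by
  match L, hne with
  | x :: r, _ =>
    have hx := hsub x List.mem_cons_self
    have hvx := hunv x List.mem_cons_self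
    have hxv : x ∉ v := by
      intro hm
      rw [pvContains_decide] at hvx
      simp [hm] at hvx
    have h1 : pvUnvis rg (PySem.Set.add v x) + 1 = pvUnvis rg v :=
      pvUnvis_add rg v x hx (by simp [hxv])
    have h2 : pvUnvis rg ((x :: r).foldl PySem.Set.add v) ≤ pvUnvis rg (PySem.Set.add v x) := by
      simp only [List.foldl_cons]
      exact pvUnvis_foldl_le rg r (PySem.Set.add v x)
    omega

-- B's recursive 'go': flatten, dedup in a staged pass, batch-record, recurse on the level
def pvGo (rg : List (String × List String)) (frontier : List String)
    (visited : PySem.Set String) (depth : Int) (callers : PySem.Dict String Int) :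
    PySem.Dict String Int :=
  let discovered := pvDedup visited []
    (frontier.flatMap (fun node => PySem.Dict.getD (PySem.Dict.mk rg) node []))
  let callers' := discovered.foldl (fun cc c => cc.insert c depth) callers
  if discovered = [] then callers'
  else pvGo rg discovered (discovered.foldl PySem.Set.add visited) (depth + 1) callers'
termination_by pvUnvis rg visited
decreasing_by
  rename_i hne
  apply pvUnvis_foldl_lt rg _ visited hne
  · intro x hx
    rcases pvDedup_mem visited _ [] x hx with h | h
    · simp at h
    · rcases List.mem_flatMap.1 h with ⟨n, _, hxn⟩
      exact pvMemGetD rg n x hxn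
  · intro x hx
    exact pvDedup_unvis visited _ [] (by intro y hy; simp at hy) x hx

def find_transitive_callers_alt (reverse_graph : List (String × List String)) (target : String) : List (String × Int) :=
  (pvGo reverse_graph [target] (PySem.Set.ofList [target]) 1 PySem.Dict.empty).items

-- ===== PRECONDITION & SPEC =====
def Spec_find_transitive_callers (reverse_graph : List (String × List String)) (target : String) (out : List (String × Int)) : Prop := out = find_transitive_callers_alt reverse_graph target
instance (reverse_graph : List (String × List String)) (target : String) (out : List (String × Int)) : Decidable (Spec_find_transitive_callers reverse_graph target out) := by unfold Spec_find_transitive_callers; infer_instance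

-- ===== CLAIM (what is proved, stated in full; the proofs are below) =====
def Claim_equal_find_transitive_callers : Prop := ∀ (reverse_graph : List (String × List String)) (target : String), Dom_find_transitive_callers reverse_graph target → Spec_find_transitive_callers reverse_graph target (find_transitive_callers reverse_graph target)

-- ===== LEMMAS AND PROOFS =====

-- proof-side per-element step of a level; state = (callers, visited, discovered)
def pvFB (depth : Int)
    (st : PySem.Dict String Int × PySem.Set String × List String) (caller : String) :
    PySem.Dict String Int × PySem.Set String × List String :=
  if PySem.Set.contains st.2.1 caller then st
  else (st.1.insert caller depth, PySem.Set.add st.2.1 caller, st.2.2 ++ [caller])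

-- a whole level as nested folds (proof-side)
def pvLevelB (rg : List (String × List String)) (depth : Int)
    (st : PySem.Dict String Int × PySem.Set String × List String) (frontier : List String) :
    PySem.Dict String Int × PySem.Set String × List String :=
  frontier.foldl (fun st node => (PySem.Dict.getD (PySem.Dict.mk rg) node []).foldl (pvFB depth) st) st

-- A's inner loop, run on a queue whose tail is the next-frontier at depth d+1, is the pvFB fold
theorem pvFoldAB (d : Int) (q : List (String × Int)) :
    ∀ (adj : List String) (c : PySem.Dict String Int) (v : PySem.Set String) (nf : List String),
      adj.foldl (pvFA d) (c, q ++ nf.map (fun x => (x, d + 1)), v) =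
        ((adj.foldl (pvFB (d + 1)) (c, v, nf)).1,
         q ++ (adj.foldl (pvFB (d + 1)) (c, v, nf)).2.2.map (fun x => (x, d + 1)),
         (adj.foldl (pvFB (d + 1)) (c, v, nf)).2.1) := by
  intro adj
  induction adj with
  | nil => intro c v nf; rfl
  | cons x adj ih =>
    intro c v nf
    simp only [List.foldl_cons]
    by_cases h : PySem.Set.contains v x
    · simp only [pvFA, pvFB, h, if_true]
      exact ih c v nf
    · simp only [pvFA, pvFB, h]
      have := ih (c.insert x (d + 1)) (PySem.Set.add v x) (nf ++ [x])
      simpa [List.map_append, List.append_assoc] using this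

-- processing a whole level's worth of A's queue = the nested pvFB fold
theorem pvLevelAB (rg : List (String × List String)) (d : Int) :
    ∀ (fr : List String) (c : PySem.Dict String Int) (v : PySem.Set String) (nf : List String),
      pvLoopA rg c (fr.map (fun x => (x, d)) ++ nf.map (fun x => (x, d + 1))) v =
        pvLoopA rg (pvLevelB rg (d + 1) (c, v, nf) fr).1
          ((pvLevelB rg (d + 1) (c, v, nf) fr).2.2.map (fun x => (x, d + 1)))
          (pvLevelB rg (d + 1) (c, v, nf) fr).2.1 := by
  intro fr
  induction fr with
  | nil => intro c v nf; rfl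
  | cons x fr ih =>
    intro c v nf
    simp only [List.map_cons, List.cons_append]
    rw [pvLoopA.eq_2]
    have hstep := pvFoldAB d (fr.map (fun x => (x, d))) (PySem.Dict.getD (PySem.Dict.mk rg) x []) c v nf
    simp only [hstep]
    rw [ih]
    rfl

-- the nested fold over the frontier = one fold over the flattened candidate list
theorem pvLevelB_flat (rg : List (String × List String)) (d : Int) :
    ∀ (fr : List String) (st : PySem.Dict String Int × PySem.Set String × List String),
      pvLevelB rg d st fr =
        (fr.flatMap (fun node => PySem.Dict.getD (PySem.Dict.mk rg) node [])).foldl (pvFB d) st := by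
  intro fr
  induction fr with
  | nil => intro st; rfl
  | cons n fr ih =>
    intro st
    simp only [pvLevelB, List.foldl_cons, List.flatMap_cons, List.foldl_append]
    exact ih _

theorem pvContains_foldl_add :
    ∀ (L : List String) (v : PySem.Set String) (x : String),
      PySem.Set.contains (L.foldl PySem.Set.add v) x = (PySem.Set.contains v x || L.contains x) := by
  intro L
  induction L with
  | nil => intro v x; simp
  | cons y r ih =>
    intro v x
    simp only [List.foldl_cons]
    rw [ih]
    have hadd : PySem.Set.contains (PySem.Set.add v y) x = (PySem.Set.contains v x || (x == y)) := by
      rw [pvContains_decide, pvContains_decide]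
      by_cases hxy : x = y
      · simp [PySem.Set.mem_add, hxy]
      · simp [PySem.Set.mem_add, hxy]
    rw [hadd]
    by_cases hxy : x = y
    · simp [hxy]
    · have hb : (x == y) = false := by simpa using hxy
      simp [hxy, hb]

-- the NEW elements pvDedup appends beyond its accumulator
def pvNews (v : PySem.Set String) (acc : List String) : List String → List String
  | [] => []
  | c :: rest =>
    if PySem.Set.contains v c || acc.contains c then pvNews v acc rest
    else c :: pvNews v (acc ++ [c]) rest

theorem pvDedup_eq_news (v : PySem.Set String) :
    ∀ (cands acc : List String), pvDedup v acc cands = acc ++ pvNews v acc cands := by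
  intro cands
  induction cands with
  | nil => intro acc; simp [pvDedup, pvNews]
  | cons c rest ih =>
    intro acc
    unfold pvDedup pvNews
    by_cases h : PySem.Set.contains v c || acc.contains c
    · rw [if_pos h, if_pos h]
      exact ih acc
    · rw [if_neg h, if_neg h]
      rw [ih (acc ++ [c])]
      simp

-- the interleaved per-element fold equals the staged computation over the frozen visited set
theorem pvStaged (d : Int) :
    ∀ (cands : List String) (c : PySem.Dict String Int) (v : PySem.Set String) (disc : List String),
      cands.foldl (pvFB d) (c, disc.foldl PySem.Set.add v, disc) =
        ((pvNews v disc cands).foldl (fun cc x => cc.insert x d) c,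
         (disc ++ pvNews v disc cands).foldl PySem.Set.add v,
         disc ++ pvNews v disc cands) := by
  intro cands
  induction cands with
  | nil => intro c v disc; simp [pvNews]
  | cons x rest ih =>
    intro c v disc
    simp only [List.foldl_cons]
    have hguard : PySem.Set.contains (disc.foldl PySem.Set.add v) x =
        (PySem.Set.contains v x || disc.contains x) := pvContains_foldl_add disc v x
    by_cases hb : (PySem.Set.contains v x || disc.contains x) = true
    · have hN : pvNews v disc (x :: rest) = pvNews v disc rest := by
        simp only [pvNews]
        rw [hb]
        simp
      have hstep : pvFB d (c, disc.foldl PySem.Set.add v, disc) x =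
          (c, disc.foldl PySem.Set.add v, disc) := by
        simp only [pvFB]
        rw [hguard, hb]
        simp
      rw [hstep, hN]
      exact ih c v disc
    · have hb' : (PySem.Set.contains v x || disc.contains x) = false := by
        cases hh : (PySem.Set.contains v x || disc.contains x)
        · rfl
        · exact absurd hh hb
      have hN : pvNews v disc (x :: rest) = x :: pvNews v (disc ++ [x]) rest := by
        simp only [pvNews]
        rw [hb']
        simp
      have hstep : pvFB d (c, disc.foldl PySem.Set.add v, disc) x =
          (c.insert x d, (disc ++ [x]).foldl PySem.Set.add v, disc ++ [x]) := by
        simp only [pvFB]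
        rw [hguard, hb']
        simp [List.foldl_append]
      rw [hstep, hN]
      rw [ih (c.insert x d) v (disc ++ [x])]
      simp [List.append_assoc]

-- A's loop on a single-depth queue is B's recursion (insert depth e = queue depth e-1 plus one)
theorem pvMainAB_aux (rg : List (String × List String)) :
    ∀ (n : Nat) (fr : List String) (v : PySem.Set String) (e : Int) (c : PySem.Dict String Int),
      pvUnvis rg v ≤ n → pvLoopA rg c (fr.map (fun x => (x, e - 1))) v = pvGo rg fr v e c := by
  intro n
  induction n using Nat.strong_induction_on with
  | _ n ih =>
    intro fr v e c hn
    have hlev := pvLevelAB rg (e - 1) fr c v []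
    simp only [List.map_nil, List.append_nil] at hlev
    rw [sub_add_cancel] at hlev
    rw [pvLevelB_flat] at hlev
    have hst := pvStaged e (fr.flatMap (fun node => PySem.Dict.getD (PySem.Dict.mk rg) node [])) c v []
    simp only [List.foldl_nil, List.nil_append] at hst
    rw [hst] at hlev
    have hDeq : pvNews v [] (fr.flatMap (fun node => PySem.Dict.getD (PySem.Dict.mk rg) node [])) =
        pvDedup v [] (fr.flatMap (fun node => PySem.Dict.getD (PySem.Dict.mk rg) node [])) := by
      rw [pvDedup_eq_news]
      simp
    rw [hDeq] at hlev
    rw [hlev, pvGo]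
    by_cases hD : pvDedup v [] (fr.flatMap (fun node => PySem.Dict.getD (PySem.Dict.mk rg) node [])) = []
    · simp only [hD, List.foldl_nil, List.map_nil, if_pos]
      rw [pvLoopA.eq_1]
    · simp only [if_neg hD]
      have hsubm : ∀ x ∈ pvDedup v [] (fr.flatMap (fun node => PySem.Dict.getD (PySem.Dict.mk rg) node [])),
          x ∈ rg.flatMap Prod.snd := by
        intro x hx
        rcases pvDedup_mem v _ [] x hx with h | h
        · simp at h
        · rcases List.mem_flatMap.1 h with ⟨m, _, hxm⟩
          exact pvMemGetD rg m x hxm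
      have hunv : ∀ x ∈ pvDedup v [] (fr.flatMap (fun node => PySem.Dict.getD (PySem.Dict.mk rg) node [])),
          PySem.Set.contains v x = false := by
        intro x hx
        exact pvDedup_unvis v _ [] (by intro y hy; simp at hy) x hx
      have hlt : pvUnvis rg ((pvDedup v [] (fr.flatMap (fun node => PySem.Dict.getD (PySem.Dict.mk rg) node []))).foldl PySem.Set.add v) < pvUnvis rg v :=
        pvUnvis_foldl_lt rg _ v hD hsubm hunv
      have ihx := ih _ (lt_of_lt_of_le hlt hn) (pvDedup v [] (fr.flatMap (fun node => PySem.Dict.getD (PySem.Dict.mk rg) node [])))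
        ((pvDedup v [] (fr.flatMap (fun node => PySem.Dict.getD (PySem.Dict.mk rg) node []))).foldl PySem.Set.add v)
        (e + 1)
        ((pvDedup v [] (fr.flatMap (fun node => PySem.Dict.getD (PySem.Dict.mk rg) node []))).foldl (fun cc x => cc.insert x e) c)
        le_rfl
      rw [show e + 1 - 1 = e from by ring] at ihx
      exact ihx

theorem pvMainAB (rg : List (String × List String)) (fr : List String) (v : PySem.Set String)
    (e : Int) (c : PySem.Dict String Int) :
    pvLoopA rg c (fr.map (fun x => (x, e - 1))) v = pvGo rg fr v e c :=
  pvMainAB_aux rg (pvUnvis rg v) fr v e c le_rfl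

-- ===== VERDICT (by name: the statement is the Claim_ definition above) =====
theorem find_transitive_callers_spec : Claim_equal_find_transitive_callers := by
  intro rg target _
  unfold Spec_find_transitive_callers find_transitive_callers find_transitive_callers_alt
  have := pvMainAB rg [target] (PySem.Set.ofList [target]) 1 PySem.Dict.empty
  simp only [List.map_cons, List.map_nil, show (1:Int) - 1 = 0 from rfl] at this
  rw [this]
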